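-- pv_equiv track=rewrite | github.com/dinleo/CodeTest | Programmers_Test/Test/test3_1.py | solution
-- ===== SOURCE A (Python) =====
-- import math
--
-- def solution(n):
--     n2 = n
--     answer = 0
--     if n2 % 2 != 0:
--         n2 -= 1
--     arr = [[] for i in range(int(n2 / 2) + 1)]
--     for i in range(int(n2 / 2) + 1):
--         for j in range(int(n2 / 2)):
--             if i <= j:
--                 arr[i].append(1)
--                 arr[i].append(1)
--             else:
--                 arr[i].append(2)
--     if n % 2 != 0:
--         for i in arr:
--             i.append(1)
--
--     for i in arr:
--         a = i.count(1)
--         b = i.count(2)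
--         a_b = math.factorial(a+b)
--         ab = math.factorial(a) * math.factorial(b)
--         answer += (a_b)//ab
--
--     return answer%1234567
-- ===== SOURCE B (Python) =====
-- def solution(n):
--     # Each row i contributes C(n-i, i); the diagonal sum of Pascal's triangle
--     # is a Fibonacci number, so the answer is fib(n+1) under the problem's modulus,
--     # computed by a single O(n) pair iteration with small numbers.
--     if n < 0:
--         return 0
--     M = 1234567
--     a, b = 0, 1
--     for _ in range(n + 1):
--         a, b = b, (a + b) % M
--     return a
-- ===== Notes on version B (the rewrite author's own statement) =====
-- stated objective: faster
-- what changed: Replaces the quadratic row/array construction, counting and big-integer factorial binomials by the closed-form identity sum_i C(n-i,i) = fib(n+1), computed as an O(n) Fibonacci pair iteration under the problem's modulus with small numbers.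
import Mathlib
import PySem

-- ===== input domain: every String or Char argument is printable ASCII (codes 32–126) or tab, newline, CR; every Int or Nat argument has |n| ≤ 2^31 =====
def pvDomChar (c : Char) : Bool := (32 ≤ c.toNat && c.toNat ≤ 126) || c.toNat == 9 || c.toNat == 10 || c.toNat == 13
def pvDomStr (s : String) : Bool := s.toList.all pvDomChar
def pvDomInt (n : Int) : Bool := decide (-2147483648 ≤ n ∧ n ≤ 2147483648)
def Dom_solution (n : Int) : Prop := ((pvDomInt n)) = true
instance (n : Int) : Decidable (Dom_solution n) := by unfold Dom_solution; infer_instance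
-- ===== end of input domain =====

-- B replaces A's quadratic row construction and big-factorial binomials by the
-- diagonal-of-Pascal identity: the answer is fib(n+1) under the problem's modulus, computed by an
-- O(n) pair iteration (objective: faster, asymptotic).

-- ===== PORT A =====
-- math.factorial; exact for the nonnegative arguments A feeds it (list counts)
def pyFactorial (m : Int) : Int := (Nat.factorial m.toNat : Int)

def solution (n : Int) : Int :=
  let n2 := if PySem.Int.mod n 2 ≠ 0 then n - 1 else n
  -- int(n2/2): n2 is always even here (|n| ≤ 2^31 so n2/2 is an exact float),
  -- and floor division = truncating division on an exact even quotient
  let k := PySem.Int.floordiv n2 2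
  let arr : List (List Int) :=
    (PySem.List.pyRange 0 (k + 1) 1).map (fun i =>
      (PySem.List.pyRange 0 k 1).foldl
        (fun row j => if i ≤ j then row ++ [1] ++ [1] else row ++ [2]) [])
  let arr := if PySem.Int.mod n 2 ≠ 0 then arr.map (fun row => row ++ [1]) else arr
  let answer := arr.foldl (fun answer row =>
      let a : Int := (PySem.List.count row 1 : Nat)
      let b : Int := (PySem.List.count row 2 : Nat)
      let a_b := pyFactorial (a + b)
      let ab := pyFactorial a * pyFactorial b
      answer + PySem.Int.floordiv a_b ab) 0
  PySem.Int.mod answer 1234567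

-- ===== PORT B =====
def solution_alt (n : Int) : Int :=
  if n < 0 then 0
  else
    ((PySem.List.pyRange 0 (n + 1) 1).foldl
      (fun (ab : Int × Int) _ => (ab.2, PySem.Int.mod (ab.1 + ab.2) 1234567)) (0, 1)).1

-- ===== PRECONDITION & SPEC =====
def Spec_solution (n : Int) (out : Int) : Prop := out = solution_alt n
instance (n : Int) (out : Int) : Decidable (Spec_solution n out) := by unfold Spec_solution; infer_instance

-- ===== CLAIM (what is proved, stated in full; the proofs are below) =====
def Claim_equal_solution : Prop := ∀ (n : Int), Dom_solution n → Spec_solution n (solution n)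

-- ===== LEMMAS AND PROOFS =====

-- the inner j-loop builds `i` twos followed by 2*(k-i) ones
lemma row_content (i : Int) (hi : 0 ≤ i) (m : Nat) :
    (PySem.List.pyRange 0 (m : Int) 1).foldl
      (fun row j => if i ≤ j then row ++ [1] ++ [1] else row ++ [2]) []
    = List.replicate (min i.toNat m) 2 ++ List.replicate (2 * (m - i.toNat)) (1 : Int) := by
  induction m with
  | zero => simp [PySem.List.pyRange_one_eq_nil]
  | succ m ih =>
      rw [show (((m + 1 : Nat)) : Int) = (m : Int) + 1 by push_cast; ring,
        PySem.List.pyRange_one_succ_right (by positivity), List.foldl_append, ih]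
      simp only [List.foldl_cons, List.foldl_nil]
      by_cases h : i ≤ (m : Int)
      · rw [if_pos h,
          Nat.min_eq_left (by omega : i.toNat ≤ m),
          Nat.min_eq_left (by omega : i.toNat ≤ m + 1),
          show 2 * (m + 1 - i.toNat) = 2 * (m - i.toNat) + 1 + 1 by omega,
          List.replicate_succ', List.replicate_succ']
        simp [List.append_assoc]
      · rw [if_neg h,
          Nat.min_eq_right (by omega : m ≤ i.toNat),
          Nat.min_eq_right (by omega : m + 1 ≤ i.toNat),
          show 2 * (m - i.toNat) = 0 by omega,
          show 2 * (m + 1 - i.toNat) = 0 by omega,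
          List.replicate_succ']
        simp

-- exact factorial division is a binomial coefficient
lemma factdiv (a b : Nat) :
    PySem.Int.floordiv ((Nat.factorial (a + b) : Nat) : Int)
      (((Nat.factorial a : Nat) : Int) * ((Nat.factorial b : Nat) : Int))
    = ((Nat.choose (a + b) b : Nat) : Int) := by
  rw [show ((Nat.factorial a : Nat) : Int) * ((Nat.factorial b : Nat) : Int)
      = ((Nat.factorial a * Nat.factorial b : Nat) : Int) by push_cast; ring,
    PySem.Int.floordiv_natCast]
  congr 1
  have h := Nat.choose_mul_factorial_mul_factorial (Nat.le_add_left b a)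
  rw [Nat.add_sub_cancel] at h
  rw [show Nat.factorial (a + b) = Nat.choose (a + b) b * (Nat.factorial a * Nat.factorial b) by
      rw [← h]; ring]
  exact Nat.mul_div_cancel _ (by positivity)

lemma list_sum_range (n : Nat) (f : Nat → Int) :
    ((List.range n).map f).sum = ∑ i ∈ Finset.range n, f i := by
  induction n with
  | zero => simp
  | succ n ih => rw [List.range_succ, Finset.sum_range_succ, ← ih]; simp

-- diagonal sums of Pascal's triangle are Fibonacci numbers
lemma diag_sum (m : Nat) :
    ∑ i ∈ Finset.range (m / 2 + 1), Nat.choose (m - i) i = Nat.fib (m + 1) := by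
  rw [Nat.fib_succ_eq_sum_choose, Finset.Nat.sum_antidiagonal_eq_sum_range_succ_mk]
  have hrefl := Finset.sum_range_reflect (fun k => Nat.choose k (m - k)) (m + 1)
  simp only at hrefl
  rw [← hrefl]
  have : ∀ j ∈ Finset.range (m + 1),
      Nat.choose (m + 1 - 1 - j) (m - (m + 1 - 1 - j)) = Nat.choose (m - j) j := by
    intro j hj
    simp only [Finset.mem_range] at hj
    congr 1
    omega
  rw [Finset.sum_congr rfl this]
  refine Finset.sum_subset (fun x hx => ?_) ?_
  · simp only [Finset.mem_range] at hx ⊢; omega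
  · intro j _ hj
    simp only [Finset.mem_range, not_lt] at hj
    exact Nat.choose_eq_zero_of_lt (by omega)

-- the B loop maintains consecutive Fibonacci residues
lemma fib_loop (m : Nat) :
    (List.range m).foldl
      (fun (ab : Int × Int) _ => (ab.2, PySem.Int.mod (ab.1 + ab.2) 1234567)) ((0 : Int), (1 : Int))
    = (((Nat.fib m % 1234567 : Nat) : Int), ((Nat.fib (m + 1) % 1234567 : Nat) : Int)) := by
  induction m with
  | zero => simp
  | succ m ih =>
      rw [List.range_succ, List.foldl_append, ih]
      simp only [List.foldl_cons, List.foldl_nil]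
      rw [Prod.mk.injEq]
      refine ⟨rfl, ?_⟩
      rw [show ((Nat.fib m % 1234567 : Nat) : Int) + ((Nat.fib (m + 1) % 1234567 : Nat) : Int)
            = ((Nat.fib m % 1234567 + Nat.fib (m + 1) % 1234567 : Nat) : Int) by push_cast; ring,
          show (1234567 : Int) = ((1234567 : Nat) : Int) by norm_num,
          PySem.Int.mod_natCast]
      congr 1
      rw [Nat.fib_add_two]
      omega

-- the whole row loop of A sums to a Fibonacci number (o = 1 exactly when n is odd)
lemma answer_eq (kN o : Nat) (ho : o ≤ 1) :
    ((PySem.List.pyRange 0 ((kN : Int) + 1) 1).map (fun i =>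
        (PySem.List.pyRange 0 (kN : Int) 1).foldl
          (fun (row : List Int) j => if i ≤ j then row ++ [1] ++ [1] else row ++ [2]) []
        ++ List.replicate o (1 : Int))).foldl
      (fun answer row =>
        answer + PySem.Int.floordiv
          (pyFactorial (((PySem.List.count row 1 : Nat) : Int) + ((PySem.List.count row 2 : Nat) : Int)))
          (pyFactorial ((PySem.List.count row 1 : Nat) : Int) *
            pyFactorial ((PySem.List.count row 2 : Nat) : Int))) 0
    = ((Nat.fib (2 * kN + o + 1) : Nat) : Int) := by
  rw [show PySem.List.pyRange 0 ((kN : Int) + 1) 1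
      = (List.range (kN + 1)).map (fun k : Nat => (0 : Int) + (k : Int)) by
        rw [PySem.List.pyRange_one]
        congr 2,
    List.map_map]
  have hmap : (List.range (kN + 1)).map
        ((fun i => (PySem.List.pyRange 0 (kN : Int) 1).foldl
            (fun (row : List Int) j => if i ≤ j then row ++ [1] ++ [1] else row ++ [2]) []
          ++ List.replicate o (1 : Int)) ∘ (fun k : Nat => (0 : Int) + (k : Int)))
      = (List.range (kN + 1)).map (fun j =>
          List.replicate j 2 ++ List.replicate (2 * (kN - j)) (1 : Int) ++ List.replicate o 1) := by
    refine List.map_congr_left (fun j hj => ?_)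
    simp only [List.mem_range] at hj
    simp only [Function.comp_apply]
    rw [row_content ((0 : Int) + (j : Int)) (by positivity) kN]
    simp only [zero_add, Int.toNat_natCast]
    rw [Nat.min_eq_left (by omega : j ≤ kN)]
  rw [hmap, PySem.List.foldl_add, List.map_map]
  have hval : (List.range (kN + 1)).map
        ((fun row =>
          PySem.Int.floordiv
            (pyFactorial (((PySem.List.count row 1 : Nat) : Int) + ((PySem.List.count row 2 : Nat) : Int)))
            (pyFactorial ((PySem.List.count row 1 : Nat) : Int) *
              pyFactorial ((PySem.List.count row 2 : Nat) : Int))) ∘ (fun j =>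
          List.replicate j 2 ++ List.replicate (2 * (kN - j)) (1 : Int) ++ List.replicate o 1))
      = (List.range (kN + 1)).map (fun j => ((Nat.choose (2 * kN + o - j) j : Nat) : Int)) := by
    refine List.map_congr_left (fun j hj => ?_)
    simp only [List.mem_range] at hj
    simp only [Function.comp_apply]
    have hc1 : PySem.List.count
        (List.replicate j 2 ++ List.replicate (2 * (kN - j)) (1 : Int) ++ List.replicate o 1) 1
        = 2 * (kN - j) + o := by
      rw [PySem.List.count_eq]
      simp [List.count_append, List.count_replicate]
    have hc2 : PySem.List.count
        (List.replicate j 2 ++ List.replicate (2 * (kN - j)) (1 : Int) ++ List.replicate o 1) 2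
        = j := by
      rw [PySem.List.count_eq]
      simp [List.count_append, List.count_replicate]
    rw [hc1, hc2,
      show ((2 * (kN - j) + o : Nat) : Int) + ((j : Nat) : Int) = ((2 * (kN - j) + o + j : Nat) : Int)
        by push_cast; ring]
    have hfact : ∀ m : Nat, pyFactorial ((m : Nat) : Int) = ((Nat.factorial m : Nat) : Int) := by
      intro m; rw [pyFactorial, Int.toNat_natCast]
    rw [hfact, hfact, hfact, factdiv]
    congr 2
    all_goals omega
  rw [hval, list_sum_range, zero_add,
    show (2 * kN + o + 1) = (2 * kN + o) + 1 by ring, ← diag_sum (2 * kN + o),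
    show (2 * kN + o) / 2 = kN by omega]
  push_cast
  rfl

-- A on a nonnegative input computes fib(n+1) reduced by the modulus
lemma solution_nonneg (nt : Nat) :
    solution (nt : Int) = ((Nat.fib (nt + 1) % 1234567 : Nat) : Int) := by
  have hmod : PySem.Int.mod ((nt : Nat) : Int) 2 = ((nt % 2 : Nat) : Int) := by
    exact_mod_cast PySem.Int.mod_natCast nt 2
  have hM : (1234567 : Int) = ((1234567 : Nat) : Int) := by norm_num
  simp only [solution]
  by_cases hp : nt % 2 = 0
  · rw [if_neg (by rw [hmod, hp]; simp), if_neg (by rw [hmod, hp]; simp),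
      show PySem.Int.floordiv ((nt : Nat) : Int) 2 = ((nt / 2 : Nat) : Int) by
        exact_mod_cast PySem.Int.floordiv_natCast nt 2]
    rw [show (PySem.List.pyRange 0 (((nt / 2 : Nat) : Int) + 1) 1).map (fun i =>
          (PySem.List.pyRange 0 ((nt / 2 : Nat) : Int) 1).foldl
            (fun (row : List Int) j => if i ≤ j then row ++ [1] ++ [1] else row ++ [2]) [])
        = (PySem.List.pyRange 0 (((nt / 2 : Nat) : Int) + 1) 1).map (fun i =>
          (PySem.List.pyRange 0 ((nt / 2 : Nat) : Int) 1).foldl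
            (fun (row : List Int) j => if i ≤ j then row ++ [1] ++ [1] else row ++ [2]) []
          ++ List.replicate 0 (1 : Int)) from List.map_congr_left (fun i _ => by simp),
      answer_eq (nt / 2) 0 (by omega),
      show 2 * (nt / 2) + 0 = nt by omega, hM, PySem.Int.mod_natCast]
  · rw [if_pos (by rw [hmod]; simp; omega), if_pos (by rw [hmod]; simp; omega)]
    have hub : ((nt : Nat) : Int) - 1 = ((nt - 1 : Nat) : Int) := by
      have : 1 ≤ nt := by omega
      push_cast [this]; ring
    rw [hub,
      show PySem.Int.floordiv ((nt - 1 : Nat) : Int) 2 = ((nt / 2 : Nat) : Int) by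
        rw [show PySem.Int.floordiv ((nt - 1 : Nat) : Int) 2 = (((nt - 1) / 2 : Nat) : Int) by
            exact_mod_cast PySem.Int.floordiv_natCast (nt - 1) 2]
        congr 1
        omega,
      List.map_map]
    rw [show ((fun row : List Int => row ++ [1]) ∘ (fun i =>
          (PySem.List.pyRange 0 ((nt / 2 : Nat) : Int) 1).foldl
            (fun (row : List Int) j => if i ≤ j then row ++ [1] ++ [1] else row ++ [2]) []))
        = (fun i =>
          (PySem.List.pyRange 0 ((nt / 2 : Nat) : Int) 1).foldl
            (fun (row : List Int) j => if i ≤ j then row ++ [1] ++ [1] else row ++ [2]) []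
          ++ List.replicate 1 (1 : Int)) from funext (fun i => rfl),
      answer_eq (nt / 2) 1 (by omega),
      show 2 * (nt / 2) + 1 = nt by omega, hM, PySem.Int.mod_natCast]

lemma solution_alt_nonneg (nt : Nat) :
    solution_alt (nt : Int) = ((Nat.fib (nt + 1) % 1234567 : Nat) : Int) := by
  rw [solution_alt, if_neg (by omega)]
  rw [show ((nt : Int) + 1) = ((nt + 1 : Nat) : Int) by push_cast; ring,
    PySem.List.pyRange_one,
    show ((nt + 1 : Nat) : Int) - 0 = ((nt + 1 : Nat) : Int) by ring,
    Int.toNat_natCast]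
  simp only [List.foldl_map]
  exact congrArg Prod.fst (fib_loop (nt + 1))

lemma solution_neg (n : Int) (hn : n < 0) : solution n = 0 := by
  simp only [solution]
  have h2 : (if PySem.Int.mod n 2 ≠ 0 then n - 1 else n) < 0 := by split <;> omega
  have hk : PySem.Int.floordiv (if PySem.Int.mod n 2 ≠ 0 then n - 1 else n) 2 + 1 ≤ 0 := by
    have := (PySem.Int.floordiv_lt_iff_lt_mul
      (a := if PySem.Int.mod n 2 ≠ 0 then n - 1 else n) (b := 2) (q := 0) (by norm_num)).mpr
      (by omega)
    omega
  rw [show PySem.List.pyRange 0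
      (PySem.Int.floordiv (if PySem.Int.mod n 2 ≠ 0 then n - 1 else n) 2 + 1) 1 = ([] : List Int)
      from PySem.List.pyRange_one_eq_nil (by omega)]
  simp only [List.map_nil, ite_self, List.foldl_nil]
  decide

theorem solution_eq (n : Int) : solution n = solution_alt n := by
  rcases lt_or_ge n 0 with h | h
  · rw [solution_neg n h, solution_alt, if_pos h]
  · obtain ⟨m, rfl⟩ := Int.eq_ofNat_of_zero_le h
    rw [solution_nonneg, solution_alt_nonneg]

-- ===== VERDICT (by name: the statement is the Claim_ definition above) =====
theorem solution_spec : Claim_equal_solution := by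
  intro n _
  unfold Spec_solution
  exact solution_eq n
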